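-- pv_equiv track=rewrite | github.com/cambridge-cares/TheWorldAvatar | locate_then_ask/sparql_compact2verbose.py | convert_concretepredicate_property_locateclause
-- ===== SOURCE A (Python) =====
-- def convert_concretepredicate_property_locateclause(sparql_compact: str, key: str):
--     template = """
-- ?Species os:has{PropertyName} ?{PropertyName} .
-- ?{PropertyName} os:value ?{PropertyName}Value ; os:unit/rdfs:label ?{PropertyName}UnitLabel .
-- OPTIONAL {{
--     ?{PropertyName} os:hasReferenceState [ os:value ?{PropertyName}ReferenceStateValue ; os:unit/rdfs:label ?{PropertyName}ReferenceStateUnitLabel ] .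
-- }}"""
--     pattern = template.format(PropertyName=key)
--
--     sparql_compact = sparql_compact.strip()
--     assert sparql_compact.startswith("FILTER")
--
--     sparql_compact = sparql_compact[len("FILTER") :].strip()
--     assert sparql_compact.startswith("("), sparql_compact
--
--     sparql_compact = sparql_compact[1:].strip()
--     ptr = 0
--     quote_open = False
--     while ptr < len(sparql_compact) and (
--         sparql_compact[ptr] != ")" or quote_open
--     ):
--         if sparql_compact[ptr] == '"':
--             quote_open = not quote_open
--         ptr += 1
--     assert sparql_compact[ptr] == ")", sparql_compact
--
--     filter_arg = sparql_compact[:ptr].strip()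
--     sparql_compact = sparql_compact[ptr + 1 :]
--     filter_arg = filter_arg.replace(key, key + "Value")
--
--     pattern += "\n    FILTER ( {arg} )".format(arg=filter_arg)
--
--     return sparql_compact, pattern
-- ===== SOURCE B (Python) =====
-- def convert_concretepredicate_property_locateclause(sparql_compact: str, key: str):
--     s = sparql_compact.strip()
--     assert s[:6] == "FILTER"
--     s = s[6:].strip()
--     assert s[:1] == "(", s
--     s = s[1:].strip()
--     # candidate positions: ')' preceded by an even number of '"' (i.e. outside quotes)
--     hits = [i for i, c in enumerate(s) if c == ')' and s[:i].count('"') % 2 == 0]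
--     assert hits, s
--     ptr = hits[0]
--     arg = s[:ptr].strip().replace(key, key + "Value")
--     pattern = (
--         "\n?Species os:has{k} ?{k} .\n"
--         "?{k} os:value ?{k}Value ; os:unit/rdfs:label ?{k}UnitLabel .\n"
--         "OPTIONAL {{\n"
--         "    ?{k} os:hasReferenceState [ os:value ?{k}ReferenceStateValue ; os:unit/rdfs:label ?{k}ReferenceStateUnitLabel ] .\n"
--         "}}\n"
--         "    FILTER ( {a} )"
--     ).format(k=key, a=arg)
--     return s[ptr + 1:], pattern
-- ===== Notes on version B (the rewrite author's own statement) =====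
-- stated objective: alternative
-- what changed: A's stateful quote-toggling pointer loop is replaced by a declarative search: collect every ')' position whose prefix holds an even number of '"' (a filtered enumeration) and take the first; the prefix asserts become slice comparisons and the whole output is produced by one combined template instead of template-then-append.
import Mathlib
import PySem

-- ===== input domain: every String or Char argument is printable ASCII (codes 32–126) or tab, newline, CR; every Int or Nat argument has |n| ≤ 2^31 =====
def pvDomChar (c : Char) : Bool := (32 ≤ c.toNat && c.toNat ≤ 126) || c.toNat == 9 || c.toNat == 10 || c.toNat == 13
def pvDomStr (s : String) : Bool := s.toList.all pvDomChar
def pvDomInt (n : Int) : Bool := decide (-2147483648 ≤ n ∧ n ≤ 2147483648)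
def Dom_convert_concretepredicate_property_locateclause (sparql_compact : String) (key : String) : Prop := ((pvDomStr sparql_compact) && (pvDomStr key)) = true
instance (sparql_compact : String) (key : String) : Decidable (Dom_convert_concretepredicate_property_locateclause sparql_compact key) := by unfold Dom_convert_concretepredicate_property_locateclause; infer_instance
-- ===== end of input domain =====

-- B replaces A's stateful quote-toggling pointer loop by a declarative filter: collect every ')'
-- position whose prefix contains an even number of '"' and take the first; prefix checks become
-- slice comparisons and the whole output pattern is produced by one template; return value only.

-- ===== PORT A =====
-- A's template.format(PropertyName=key): the template is a fixed literal, so the result is this concatenation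
def pvPattern (k : List Char) : List Char :=
  ("\n?Species os:has".toList) ++ k ++ (" ?".toList) ++ k ++ (" .\n?".toList) ++ k ++ (" os:value ?".toList) ++ k ++ ("Value ; os:unit/rdfs:label ?".toList) ++ k ++ ("UnitLabel .\nOPTIONAL {\n    ?".toList) ++ k ++ (" os:hasReferenceState [ os:value ?".toList) ++ k ++ ("ReferenceStateValue ; os:unit/rdfs:label ?".toList) ++ k ++ ("ReferenceStateUnitLabel ] .\n}".toList)

-- A's while loop: advance ptr past chars that are not an unquoted ')', toggling quote_open on '"'
def pvScanA : List Char → Bool → Nat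
  | [], _ => 0
  | c :: rest, q =>
    if c = ')' ∧ q = false then 0
    else 1 + pvScanA rest (if c = '"' then !q else q)

-- A's tail: index s3[ptr] (none = IndexError), assert it is ')', slice, replace, append FILTER line
def pvAfterA (s3 : List Char) (key : String) (pattern : List Char) : String × String :=
  let ptr := pvScanA s3 false
  match PySem.List.pyGet? s3 (ptr : Int) with
  | some c =>
    if c = ')' then
      let filter_arg := PySem.Chars.strip (PySem.List.slice s3 none (some (ptr : Int)))
      let rest := PySem.List.slice s3 (some ((ptr : Int) + 1)) none
      let filter_arg' := PySem.Chars.replace filter_arg key.toList (key.toList ++ "Value".toList)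
      (String.ofList rest, String.ofList (pattern ++ "\n    FILTER ( ".toList ++ filter_arg' ++ " )".toList))
    else ("", "")
  | none => ("", "")

def convert_concretepredicate_property_locateclause (sparql_compact : String) (key : String) : String × String :=
  let pattern := pvPattern key.toList
  let s1 := PySem.Chars.strip sparql_compact.toList
  if PySem.Chars.startswith s1 "FILTER".toList then   -- assert: False → AssertionError, outside Pre_
    let s2 := PySem.Chars.strip (PySem.List.slice s1 (some 6) none)
    if PySem.Chars.startswith s2 "(".toList then      -- assert
      let s3 := PySem.Chars.strip (PySem.List.slice s2 (some 1) none)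
      pvAfterA s3 key pattern
    else ("", "")
  else ("", "")

-- ===== PORT B =====
-- B's comprehension predicate: c == ')' and s[:i].count('"') % 2 == 0
def pvHitP (s : List Char) : Int × Char → Bool :=
  fun p => p.2 == ')' && PySem.Chars.count (PySem.List.slice s none (some p.1)) ['"'] % 2 == 0

-- B's single template literal after .format(k=key, a=arg)
def pvTmpl (k a : List Char) : List Char :=
  ("\n?Species os:has".toList) ++ k ++ (" ?".toList) ++ k ++ (" .\n?".toList) ++ k ++ (" os:value ?".toList) ++ k ++ ("Value ; os:unit/rdfs:label ?".toList) ++ k ++ ("UnitLabel .\nOPTIONAL {\n    ?".toList) ++ k ++ (" os:hasReferenceState [ os:value ?".toList) ++ k ++ ("ReferenceStateValue ; os:unit/rdfs:label ?".toList) ++ k ++ ("ReferenceStateUnitLabel ] .\n}\n    FILTER ( ".toList) ++ a ++ (" )".toList)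

-- B's tail: hits = [i for i, c in enumerate(s) if …]; assert hits; ptr = hits[0]; slice, replace, format
def pvAfterB (s : List Char) (key : String) : String × String :=
  match (PySem.List.enumerate s 0).filter (pvHitP s) with
  | [] => ("", "")                                                   -- assert hits
  | (i, _) :: _ =>                                                   -- ptr = hits[0]
    let arg := PySem.Chars.replace (PySem.Chars.strip (PySem.List.slice s none (some i))) key.toList (key.toList ++ "Value".toList)
    (String.ofList (PySem.List.slice s (some (i + 1)) none), String.ofList (pvTmpl key.toList arg))

def convert_concretepredicate_property_locateclause_alt (sparql_compact : String) (key : String) : String × String :=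
  let s0 := PySem.Chars.strip sparql_compact.toList
  if PySem.List.slice s0 none (some 6) == "FILTER".toList then       -- assert s[:6] == "FILTER"
    let s1 := PySem.Chars.strip (PySem.List.slice s0 (some 6) none)
    if PySem.List.slice s1 none (some 1) == "(".toList then          -- assert s[:1] == "("
      pvAfterB (PySem.Chars.strip (PySem.List.slice s1 (some 1) none)) key
    else ("", "")
  else ("", "")

-- ===== PRECONDITION & SPEC =====
-- Pre_ excludes exactly the inputs where A raises (AssertionError on the missing "FILTER"/"(" prefixes,
-- IndexError when no unquoted ')' exists); A returns on every input admitted here.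
def Pre_convert_concretepredicate_property_locateclause (sparql_compact : String) (key : String) : Prop :=
  let s1 := PySem.Chars.strip sparql_compact.toList
  PySem.Chars.startswith s1 "FILTER".toList = true ∧
  (let s2 := PySem.Chars.strip (PySem.List.slice s1 (some 6) none)
   PySem.Chars.startswith s2 "(".toList = true ∧
   (let s3 := PySem.Chars.strip (PySem.List.slice s2 (some 1) none)
    ∃ j, j < s3.length ∧ s3.getD j ' ' = ')' ∧ (s3.take j).count '"' % 2 = 0))
instance (sparql_compact : String) (key : String) : Decidable (Pre_convert_concretepredicate_property_locateclause sparql_compact key) := by unfold Pre_convert_concretepredicate_property_locateclause; infer_instance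

def pvWitness_convert_concretepredicate_property_locateclause : String × String := ("FILTER ( Psi > \"x)\" )", "Psi")

def Spec_convert_concretepredicate_property_locateclause (sparql_compact : String) (key : String) (out : String × String) : Prop := out = convert_concretepredicate_property_locateclause_alt sparql_compact key
instance (sparql_compact : String) (key : String) (out : String × String) : Decidable (Spec_convert_concretepredicate_property_locateclause sparql_compact key out) := by unfold Spec_convert_concretepredicate_property_locateclause; infer_instance

-- ===== CLAIM (what is proved, stated in full; the proofs are below) =====
def Claim_equal_convert_concretepredicate_property_locateclause : Prop := ∀ (sparql_compact : String) (key : String), Dom_convert_concretepredicate_property_locateclause sparql_compact key → Pre_convert_concretepredicate_property_locateclause sparql_compact key → Spec_convert_concretepredicate_property_locateclause sparql_compact key (convert_concretepredicate_property_locateclause sparql_compact key)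

-- ===== LEMMAS AND PROOFS =====

-- counting a single-character substring is counting the character
lemma pvCountGo (c : Char) : ∀ (l : List Char) (fuel acc : Nat), l.length ≤ fuel →
    PySem.Chars.count.go [c] fuel l acc = acc + l.count c := by
  intro l
  induction l with
  | nil => intro fuel acc _; cases fuel <;> simp [PySem.Chars.count.go]
  | cons x t ih =>
    intro fuel acc h
    cases fuel with
    | zero => simp at h
    | succ f =>
      have hf : t.length ≤ f := by simpa using h
      by_cases hx : x = c
      · subst hx
        simp [PySem.Chars.count.go, List.isPrefixOf, ih f (acc + 1) hf]
        omega
      · have hbe : (c == x) = false := by simp [Ne.symm hx]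
        simp [PySem.Chars.count.go, List.isPrefixOf, hbe, ih f acc hf, hx]

lemma pvCountChar (l : List Char) (c : Char) : PySem.Chars.count l [c] = l.count c := by
  simp [PySem.Chars.count]
  simpa using pvCountGo c l l.length 0 le_rfl

lemma pvStartsIff (s p : List Char) : PySem.Chars.startswith s p = true ↔ s.take p.length = p := by
  rw [PySem.Chars.startswith_iff]
  constructor
  · intro h; exact (List.prefix_iff_eq_take.mp h).symm
  · intro h; rw [List.prefix_iff_eq_take]; exact h.symm

-- A's scan stops on a ')'
lemma pvScanA_stops (cs : List Char) : ∀ q, pvScanA cs q < cs.length →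
    cs.getD (pvScanA cs q) ' ' = ')' := by
  induction cs with
  | nil => intro q h; simp [pvScanA] at h
  | cons c rest ih =>
    intro q h
    by_cases hc : c = ')' ∧ q = false
    · simp [pvScanA, hc]
    · simp only [pvScanA, if_neg hc] at h ⊢
      have h' : pvScanA rest (if c = '"' then !q else q) < rest.length := by
        simp at h; omega
      have := ih (if c = '"' then !q else q) h'
      simpa [Nat.add_comm 1] using this

-- the head of B's filtered enumeration is exactly A's scan position (with a ')' there)
lemma pvMain (s : List Char) : ∀ (cs : List Char) (k : Nat) (q : Bool),
    cs = s.drop k → (s.take k).count '"' % 2 = (if q then 1 else 0) →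
    ((PySem.List.enumerate cs (k : Int)).filter (pvHitP s)).head? =
      if pvScanA cs q < cs.length then some (((k + pvScanA cs q : Nat) : Int), ')') else none := by
  intro cs
  induction cs with
  | nil => intro k q _ _; simp [PySem.List.enumerate_nil, pvScanA]
  | cons c rest ih =>
    intro k q hdrop hcnt
    have hget : s[k]? = some c := by
      have : (s.drop k)[0]? = some c := by rw [← hdrop]; rfl
      simpa using this
    have hslice : PySem.List.slice s none (some ((k : Nat) : Int)) = s.take k :=
      PySem.List.slice_to_natCast s k
    have hP : pvHitP s ((k : Int), c) = (decide (c = ')') && decide (q = false)) := by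
      unfold pvHitP
      simp only [hslice, pvCountChar, hcnt]
      cases q <;> rw [Bool.eq_iff_iff] <;> simp
    rw [PySem.List.enumerate_cons, List.filter_cons]
    by_cases hstop : c = ')' ∧ q = false
    · obtain ⟨hc1, hq1⟩ := hstop
      subst hc1; subst hq1
      rw [hP]
      simp [pvScanA]
    · have hPf : pvHitP s ((k : Int), c) = false := by
        rw [hP]
        rcases (not_and_or.mp hstop) with h | h <;> simp [h]
      rw [hPf]
      simp only [Bool.false_eq_true, if_false]
      have hdrop' : rest = s.drop (k + 1) := by
        have h2 : s.drop (k + 1) = (s.drop k).drop 1 := by rw [List.drop_drop]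
        rw [h2, ← hdrop]
        rfl
      have htake : s.take (k + 1) = s.take k ++ [c] := by
        rw [List.take_add_one, hget]
        rfl
      have hcnt' : (s.take (k + 1)).count '"' % 2
          = (if (if c = '"' then !q else q) then 1 else 0) := by
        rw [htake, List.count_append]
        by_cases hc : c = '"'
        · subst hc
          rw [if_pos rfl]
          cases q <;> simp_all <;> omega
        · rw [if_neg hc]
          have h0 : List.count '"' [c] = 0 := by simp [hc]
          rw [h0, Nat.add_zero]
          exact hcnt
      have hrec := ih (k + 1) (if c = '"' then !q else q) hdrop' hcnt'
      have hk1 : ((k : Int) + 1) = (((k + 1 : Nat)) : Int) := by push_cast; ring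
      rw [hk1, hrec]
      have hscan : pvScanA (c :: rest) q = 1 + pvScanA rest (if c = '"' then !q else q) := by
        simp [pvScanA, hstop]
      rw [hscan]
      simp only [List.length_cons]
      generalize pvScanA rest (if c = '"' then !q else q) = m
      by_cases hlt : m < rest.length
      · rw [if_pos hlt, if_pos (by omega)]
        have he : k + 1 + m = k + (1 + m) := by omega
        rw [he]
      · rw [if_neg hlt, if_neg (by omega)]

-- B's single template equals A's pattern plus the appended FILTER line
lemma pvTmpl_eq (k a : List Char) :
    pvTmpl k a = pvPattern k ++ "\n    FILTER ( ".toList ++ a ++ " )".toList := by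
  unfold pvTmpl pvPattern
  have hsplit : ("ReferenceStateUnitLabel ] .\n}\n    FILTER ( ".toList : List Char)
      = "ReferenceStateUnitLabel ] .\n}".toList ++ "\n    FILTER ( ".toList := by decide
  rw [hsplit]
  simp only [List.append_assoc]

-- the two tails agree on every stripped argument string
lemma pvCore (s : List Char) (key : String) :
    pvAfterA s key (pvPattern key.toList) = pvAfterB s key := by
  unfold pvAfterB
  have hmain := pvMain s s 0 false rfl (by simp)
  rw [show ((0 : Nat) : Int) = (0 : Int) by rfl] at hmain
  unfold pvAfterA
  by_cases h : pvScanA s false < s.length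
  · rw [if_pos h] at hmain
    simp only [Nat.zero_add] at hmain
    obtain ⟨tl, htl⟩ : ∃ tl, (PySem.List.enumerate s 0).filter (pvHitP s)
        = ((pvScanA s false : Int), ')') :: tl := by
      cases hfil : (PySem.List.enumerate s 0).filter (pvHitP s) with
      | nil => rw [hfil] at hmain; simp at hmain
      | cons a tl =>
        rw [hfil] at hmain
        simp only [List.head?_cons, Option.some.injEq] at hmain
        exact ⟨tl, by rw [hmain]⟩
    rw [htl]
    have hgetE : s[pvScanA s false]? = some ')' := by
      rw [List.getElem?_eq_getElem h]
      have hh := pvScanA_stops s false h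
      rw [List.getD_eq_getElem _ _ h] at hh
      rw [hh]
    simp only [PySem.List.pyGet?_natCast, hgetE]
    rw [pvTmpl_eq]
    exact if_pos trivial
  · rw [if_neg h] at hmain
    cases hfil : (PySem.List.enumerate s 0).filter (pvHitP s) with
    | cons a tl => rw [hfil] at hmain; simp at hmain
    | nil =>
      have hgetE : s[pvScanA s false]? = none := List.getElem?_eq_none (by omega)
      simp only [PySem.List.pyGet?_natCast, hgetE]

-- prefix tests: startswith vs slice comparison
lemma pvStarts6 (l : List Char) :
    PySem.Chars.startswith l "FILTER".toList = (PySem.List.slice l none (some 6) == "FILTER".toList) := by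
  have h : PySem.List.slice l none (some 6) = l.take 6 := by
    simpa using PySem.List.slice_to_natCast l 6
  rw [Bool.eq_iff_iff, h, beq_iff_eq, pvStartsIff, show ("FILTER".toList).length = 6 from by decide]

lemma pvStarts1 (l : List Char) :
    PySem.Chars.startswith l "(".toList = (PySem.List.slice l none (some 1) == "(".toList) := by
  have h : PySem.List.slice l none (some 1) = l.take 1 := by
    simpa using PySem.List.slice_to_natCast l 1
  rw [Bool.eq_iff_iff, h, beq_iff_eq, pvStartsIff, show ("(".toList).length = 1 from by decide]

theorem convert_concretepredicate_property_locateclause_spec : Claim_equal_convert_concretepredicate_property_locateclause := by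
  intro sparql_compact key _ _
  unfold Spec_convert_concretepredicate_property_locateclause
  unfold convert_concretepredicate_property_locateclause
  unfold convert_concretepredicate_property_locateclause_alt
  simp only [pvStarts6, pvStarts1]
  exact if_congr Iff.rfl (if_congr Iff.rfl (pvCore _ key) rfl) rfl
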